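-- pv_equiv track=rewrite | github.com/DerickMathew/adventOfCode | 2015/08/p2/solution.py | findExpandedCharDifference
-- ===== SOURCE A (Python) =====
-- def findExpandedCharDifference(string):
--   actualLen = len(string)
--   calculatedLen = 0
--   # remove double quotes
--   index = 0
--   calculatedLen += 2
--   while index < len(string):
--     if string[index] == '"': calculatedLen += 2
--     elif string[index] == '\\': calculatedLen += 2
--     else: calculatedLen += 1
--     index += 1
--   return calculatedLen - actualLen
-- ===== SOURCE B (Python) =====
-- def findExpandedCharDifference(string):
--   # Actually construct the encoded interior: escape backslashes, then quotes.
--   # The encoded form adds two surrounding quotes, hence the +2.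
--   encoded = string.replace('\\', '\\\\').replace('"', '\\"')
--   return len(encoded) + 2 - len(string)
-- ===== Notes on version B (the rewrite author's own statement) =====
-- stated objective: alternative
-- what changed: Instead of scanning characters with an index loop and a running expanded-length accumulator, B actually constructs the encoded interior by two str.replace passes (escape backslashes, then quotes) and returns its length plus 2 for the surrounding quotes minus the original length.
import Mathlib
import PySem

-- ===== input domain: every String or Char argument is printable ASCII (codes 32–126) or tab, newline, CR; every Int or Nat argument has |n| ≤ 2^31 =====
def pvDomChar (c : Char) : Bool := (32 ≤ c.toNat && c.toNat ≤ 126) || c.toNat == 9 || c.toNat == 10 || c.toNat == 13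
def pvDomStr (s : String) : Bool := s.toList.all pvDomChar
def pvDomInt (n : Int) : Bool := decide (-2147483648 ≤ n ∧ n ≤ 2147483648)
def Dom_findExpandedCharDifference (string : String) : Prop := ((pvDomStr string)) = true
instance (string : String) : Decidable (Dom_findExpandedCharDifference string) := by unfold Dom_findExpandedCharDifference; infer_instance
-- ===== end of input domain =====

-- B replaces A's index loop with a running expanded-length accumulator by actually
-- constructing the encoded interior via two str.replace passes and measuring its length
-- (objective: alternative, same cost).
-- ===== PORT A =====
-- A's while loop: walk the characters in order, accumulating calculatedLen (2 per escape char, 1 otherwise).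
def findExpandedCharDifferenceLoop (cs : List Char) (calculatedLen : Int) : Int :=
  match cs with
  | [] => calculatedLen
  | c :: rest =>
      if c = '"' then findExpandedCharDifferenceLoop rest (calculatedLen + 2)
      else if c = '\\' then findExpandedCharDifferenceLoop rest (calculatedLen + 2)
      else findExpandedCharDifferenceLoop rest (calculatedLen + 1)

def findExpandedCharDifference (string : String) : Int :=
  let actualLen : Int := (PySem.Str.len string : Int)
  let calculatedLen : Int := findExpandedCharDifferenceLoop string.toList (0 + 2)
  calculatedLen - actualLen

-- ===== PORT B =====
def findExpandedCharDifference_alt (string : String) : Int :=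
  let encoded := PySem.Str.replace (PySem.Str.replace string "\\" "\\\\") "\"" "\\\""
  (PySem.Str.len encoded : Int) + 2 - (PySem.Str.len string : Int)

-- ===== PRECONDITION & SPEC =====
def Spec_findExpandedCharDifference (string : String) (out : Int) : Prop := out = findExpandedCharDifference_alt string
instance (string : String) (out : Int) : Decidable (Spec_findExpandedCharDifference string out) := by unfold Spec_findExpandedCharDifference; infer_instance

-- ===== CLAIM (what is proved, stated in full; the proofs are below) =====
def Claim_equal_findExpandedCharDifference : Prop := ∀ (string : String), Dom_findExpandedCharDifference string → Spec_findExpandedCharDifference string (findExpandedCharDifference string)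

-- ===== LEMMAS AND PROOFS =====
-- Single-character replace is a flatMap substituting that character.
theorem replace_go_single (o : Char) (ns : List Char) :
    ∀ (fuel : Nat) (l acc : List Char), l.length ≤ fuel →
      PySem.Chars.replace.go [o] ns fuel l acc =
        acc.reverse ++ l.flatMap (fun c => if c = o then ns else [c]) := by
  intro fuel
  induction fuel with
  | zero =>
    intro l acc h
    cases l with
    | nil => simp [PySem.Chars.replace.go]
    | cons c t => simp at h
  | succ n ih =>
    intro l acc h
    cases l with
    | nil => simp [PySem.Chars.replace.go]
    | cons c t =>
      by_cases hc : c = o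
      · have hpre : List.isPrefixOf [o] (c :: t) = true := by
          simp [List.isPrefixOf, hc]
        rw [PySem.Chars.replace.go]
        simp only [hpre, if_pos]
        rw [ih _ _ (by simpa using Nat.le_of_succ_le_succ h)]
        simp [hc]
      · have hpre : List.isPrefixOf [o] (c :: t) = false := by
          simp [List.isPrefixOf]; exact fun h' => hc h'.symm
        rw [PySem.Chars.replace.go]
        simp only [hpre, Bool.false_eq_true, if_false]
        rw [ih _ _ (by simpa using Nat.le_of_succ_le_succ h)]
        simp [hc]

theorem replace_single (o : Char) (ns : List Char) (s : List Char) :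
    PySem.Chars.replace s [o] ns = s.flatMap (fun c => if c = o then ns else [c]) := by
  rw [PySem.Chars.replace]
  have he : ([o].isEmpty) = false := rfl
  simp only [he, Bool.false_eq_true, if_false]
  exact replace_go_single o ns s.length s [] le_rfl

-- Length of the doubly-escaped interior: original length plus the escape count.
theorem encoded_length (s : List Char) :
    ((s.flatMap (fun c => if c = '\\' then ['\\', '\\'] else [c])).flatMap
        (fun c => if c = '"' then ['\\', '"'] else [c])).length =
      s.length + (s.filter (fun c => c = '"' ∨ c = '\\')).length := by
  induction s with
  | nil => simp
  | cons c t ih =>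
    by_cases h1 : c = '"' <;> by_cases h2 : c = '\\' <;>
      simp [h1, h2, List.filter, ih] <;> omega

theorem findExpandedCharDifferenceLoop_eq (cs : List Char) (acc : Int) :
    findExpandedCharDifferenceLoop cs acc =
      acc + (cs.length : Int) + ((cs.filter (fun c => c = '"' ∨ c = '\\')).length : Int) := by
  induction cs generalizing acc with
  | nil => simp [findExpandedCharDifferenceLoop]
  | cons c rest ih =>
    by_cases h1 : c = '"' <;> by_cases h2 : c = '\\' <;>
      simp [findExpandedCharDifferenceLoop, h1, h2, ih, List.filter] <;> ring

-- ===== VERDICT (by name: the statement is the Claim_ definition above) =====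
theorem findExpandedCharDifference_spec : Claim_equal_findExpandedCharDifference := by
  intro s _
  unfold Spec_findExpandedCharDifference findExpandedCharDifference findExpandedCharDifference_alt
  simp only [PySem.Str.len_eq, PySem.Str.toList_replace]
  have h1 : ("\\" : String).toList = ['\\'] := rfl
  have h2 : ("\\\\" : String).toList = ['\\', '\\'] := rfl
  have h3 : ("\"" : String).toList = ['"'] := rfl
  have h4 : ("\\\"" : String).toList = ['\\', '"'] := rfl
  rw [h1, h2, h3, h4, replace_single, replace_single, encoded_length,
    findExpandedCharDifferenceLoop_eq]
  push_cast
  ring
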